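-- pv_equiv track=rewrite | github.com/damoxc/snakepit | snakepit/lib/diff.py | _get_change_extent
-- ===== SOURCE A (Python) =====
-- def _get_change_extent(str1, str2):
--     """
--     Determines the extent of differences between two strings. Returns a tuple
--     containing the offset at which the changes start, and the negative offset
--     at which the changes end. If the two strings have neither a common prefix
--     nor a common suffix, (0, 0) is returned.
--     """
--     start = 0
--     limit = min(len(str1), len(str2))
--     while start < limit and str1[start] == str2[start]:
--         start += 1
--     end = -1
--     limit = limit - start
--     while -end <= limit and str1[end] == str2[end]:
--         end -= 1
--     return (start, end + 1)
-- ===== SOURCE B (Python) =====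
-- def _get_change_extent(str1, str2):
--     # One fused forward pass: at step k we simultaneously probe position k
--     # (for the prefix) and position -1-k (for the suffix), recording the first
--     # mismatch of each kind in sentinel accumulators; the overlap cap is
--     # applied arithmetically at the end instead of bounding a second loop.
--     n1, n2 = len(str1), len(str2)
--     m = n1 if n1 < n2 else n2
--     start = m
--     suffix = m
--     for k in range(m):
--         if start == m and str1[k] != str2[k]:
--             start = k
--         if suffix == m and str1[n1 - 1 - k] != str2[n2 - 1 - k]:
--             suffix = k
--     return (start, -min(suffix, m - start))
-- ===== Notes on version B (the rewrite author's own statement) =====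
-- stated objective: alternative
-- what changed: Replaces A's two staged while loops (forward prefix scan, then a second negative-index suffix scan bounded by the remaining length) with a single fused forward pass that probes position k and position -1-k at once, recording each first mismatch in sentinel accumulators, and applies the overlap cap arithmetically at the end.
import Mathlib
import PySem

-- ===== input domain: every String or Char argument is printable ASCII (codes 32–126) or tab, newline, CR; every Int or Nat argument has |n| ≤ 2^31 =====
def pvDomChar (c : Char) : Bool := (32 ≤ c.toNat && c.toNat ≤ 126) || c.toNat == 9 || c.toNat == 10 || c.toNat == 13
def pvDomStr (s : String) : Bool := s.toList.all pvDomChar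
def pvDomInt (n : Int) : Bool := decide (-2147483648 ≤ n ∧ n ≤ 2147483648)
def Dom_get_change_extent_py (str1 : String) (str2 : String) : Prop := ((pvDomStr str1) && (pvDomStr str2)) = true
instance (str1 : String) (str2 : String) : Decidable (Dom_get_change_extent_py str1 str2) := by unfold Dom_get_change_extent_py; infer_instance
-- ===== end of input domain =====

-- B replaces A's two staged while loops by ONE fused forward pass that probes
-- position k and position -1-k together, recording each first mismatch in a
-- sentinel accumulator, with the overlap cap applied arithmetically at the end
-- (objective: alternative).

-- ===== PORT A =====
-- first while loop: 'while start < limit and str1[start] == str2[start]: start += 1'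
def aLoop1 (s1 s2 : List Char) (limit : Nat) (start : Nat) : Nat :=
  if start < limit ∧ PySem.List.pyGet? s1 (start : Int) = PySem.List.pyGet? s2 (start : Int) then
    aLoop1 s1 s2 limit (start + 1)
  else start
termination_by limit - start

-- second while loop: 'while -end <= limit and str1[end] == str2[end]: end -= 1'
def aLoop2 (s1 s2 : List Char) (limit : Int) (e : Int) : Int :=
  if h : -e ≤ limit ∧ PySem.List.pyGet? s1 e = PySem.List.pyGet? s2 e then
    aLoop2 s1 s2 limit (e - 1)
  else e
termination_by (limit + e + 1).toNat
decreasing_by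
  have := h.1; omega

def get_change_extent_py (str1 : String) (str2 : String) : Int × Int :=
  let s1 := str1.toList
  let s2 := str2.toList
  let limit := min s1.length s2.length
  let start := aLoop1 s1 s2 limit 0
  let e := aLoop2 s1 s2 ((limit : Int) - (start : Int)) (-1)
  ((start : Int), e + 1)

-- ===== PORT B =====
-- loop body: the two sentinel updates of Source B's single 'for k in range(m)' pass
def bStep (s1 s2 : List Char) (n1 n2 m : Nat) (st : Nat × Nat) (k : Int) : Nat × Nat :=
  let start := if st.1 = m ∧ PySem.List.pyGet? s1 k ≠ PySem.List.pyGet? s2 k then k.toNat else st.1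
  let suffix := if st.2 = m ∧ PySem.List.pyGet? s1 ((n1 : Int) - 1 - k) ≠ PySem.List.pyGet? s2 ((n2 : Int) - 1 - k) then k.toNat else st.2
  (start, suffix)

def get_change_extent_py_alt (str1 : String) (str2 : String) : Int × Int :=
  let s1 := str1.toList
  let s2 := str2.toList
  let n1 := s1.length
  let n2 := s2.length
  let m := if n1 < n2 then n1 else n2
  let p := (PySem.List.pyRange 0 (m : Int) 1).foldl (bStep s1 s2 n1 n2 m) (m, m)
  ((p.1 : Int), -((min p.2 (m - p.1) : Nat) : Int))

-- ===== PRECONDITION & SPEC =====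
def Spec_get_change_extent_py (str1 : String) (str2 : String) (out : Int × Int) : Prop := out = get_change_extent_py_alt str1 str2
instance (str1 : String) (str2 : String) (out : Int × Int) : Decidable (Spec_get_change_extent_py str1 str2 out) := by unfold Spec_get_change_extent_py; infer_instance

-- ===== CLAIM (what is proved, stated in full; the proofs are below) =====
def Claim_equal_get_change_extent_py : Prop := ∀ (str1 : String) (str2 : String), Dom_get_change_extent_py str1 str2 → Spec_get_change_extent_py str1 str2 (get_change_extent_py str1 str2)

-- ===== LEMMAS AND PROOFS =====

-- proof-side measure: the number of equal leading characters of two lists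
def cpl : List Char → List Char → Nat
  | x :: xs, y :: ys => if x = y then cpl xs ys + 1 else 0
  | _, _ => 0

theorem cpl_le_left (a b : List Char) : cpl a b ≤ a.length := by
  induction a generalizing b with
  | nil => simp [cpl]
  | cons x xs ih =>
    cases b with
    | nil => simp [cpl]
    | cons y ys =>
      simp only [cpl, List.length_cons]
      split
      · have := ih ys; omega
      · omega

theorem cpl_le_right (a b : List Char) : cpl a b ≤ b.length := by
  induction a generalizing b with
  | nil => simp [cpl]
  | cons x xs ih =>
    cases b with
    | nil => simp [cpl]
    | cons y ys =>
      simp only [cpl, List.length_cons]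
      split
      · have := ih ys; omega
      · omega

theorem cpl_get_eq (a b : List Char) (i : Nat) (h : i < cpl a b) : a[i]? = b[i]? := by
  induction a generalizing b i with
  | nil => simp [cpl] at h
  | cons x xs ih =>
    cases b with
    | nil => simp [cpl] at h
    | cons y ys =>
      simp only [cpl] at h
      by_cases hxy : x = y
      · rw [if_pos hxy] at h
        cases i with
        | zero => simp [hxy]
        | succ i => simpa using ih ys i (by omega)
      · rw [if_neg hxy] at h; omega

theorem cpl_get_ne (a b : List Char) (h1 : cpl a b < a.length) (h2 : cpl a b < b.length) :
    a[cpl a b]? ≠ b[cpl a b]? := by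
  induction a generalizing b with
  | nil => simp at h1
  | cons x xs ih =>
    cases b with
    | nil => simp at h2
    | cons y ys =>
      by_cases hxy : x = y
      · simp only [cpl, if_pos hxy, List.length_cons] at *
        simpa using ih ys (by omega) (by omega)
      · simp only [cpl, if_neg hxy] at *
        simpa using hxy

theorem aLoop1_eq_aux (s1 s2 : List Char) (start : Nat)
    (h : start ≤ min s1.length s2.length)
    (hle : start ≤ cpl s1 s2) :
    aLoop1 s1 s2 (min s1.length s2.length) start = cpl s1 s2 := by
  have hc1 := cpl_le_left s1 s2
  have hc2 := cpl_le_right s1 s2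
  rw [aLoop1]
  by_cases hst : start = cpl s1 s2
  · split
    · next hcond =>
      exfalso
      rw [hst] at hcond
      have h1 : cpl s1 s2 < s1.length := by omega
      have h2 : cpl s1 s2 < s2.length := by omega
      have := cpl_get_ne s1 s2 h1 h2
      rw [PySem.List.pyGet?_natCast, PySem.List.pyGet?_natCast] at hcond
      exact this hcond.2
    · exact hst
  · have hlt : start < cpl s1 s2 := by omega
    have h1 : start < s1.length := by omega
    have h2 : start < s2.length := by omega
    rw [if_pos ⟨by omega, by
      rw [PySem.List.pyGet?_natCast, PySem.List.pyGet?_natCast]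
      exact cpl_get_eq s1 s2 start hlt⟩]
    exact aLoop1_eq_aux s1 s2 (start + 1) (by omega) (by omega)
termination_by min s1.length s2.length - start
decreasing_by omega

theorem aLoop2_eq (s1 s2 : List Char) (limit : Int)
    (hlim : limit ≤ min s1.length s2.length) :
    ∀ (k : Nat), aLoop2 s1 s2 limit (-1 - (k : Int))
      = -1 - (k : Int)
        - ((min (cpl (s1.reverse.drop k) (s2.reverse.drop k)) (limit - k).toNat : Nat) : Int) := by
  intro k
  by_cases hk : (k : Int) < limit
  case neg =>
    rw [aLoop2]
    have hcond : ¬ (-(-1 - (k : Int)) ≤ limit ∧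
        PySem.List.pyGet? s1 (-1 - (k : Int)) = PySem.List.pyGet? s2 (-1 - (k : Int))) := by
      intro hc; have := hc.1; omega
    rw [dif_neg hcond]
    have : (limit - (k : Int)).toNat = 0 := by omega
    simp [this]
  case pos =>
    have hmeas : (limit - (k : Int)).toNat ≠ 0 := by omega
    rw [aLoop2]
    have h1 : k + 1 ≤ s1.length := by omega
    have h2 : k + 1 ≤ s2.length := by omega
    have hk1 : k < s1.length := by omega
    have hk2 : k < s2.length := by omega
    have hg1 : PySem.List.pyGet? s1 (-1 - (k : Int)) = s1.reverse[k]? := by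
      have : (-1 - (k : Int)) = -((k + 1 : Nat) : Int) := by push_cast; ring
      rw [this, PySem.List.pyGet?_neg_natCast _ _ (by omega) h1,
        List.getElem?_reverse hk1]
      congr 1
      omega
    have hg2 : PySem.List.pyGet? s2 (-1 - (k : Int)) = s2.reverse[k]? := by
      have : (-1 - (k : Int)) = -((k + 1 : Nat) : Int) := by push_cast; ring
      rw [this, PySem.List.pyGet?_neg_natCast _ _ (by omega) h2,
        List.getElem?_reverse hk2]
      congr 1
      omega
    have hk1' : k < s1.reverse.length := by simpa using hk1
    have hk2' : k < s2.reverse.length := by simpa using hk2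
    rw [List.drop_eq_getElem_cons hk1', List.drop_eq_getElem_cons hk2']
    by_cases hheads : s1.reverse[k] = s2.reverse[k]
    case pos =>
      have hcond : -(-1 - (k : Int)) ≤ limit ∧
          PySem.List.pyGet? s1 (-1 - (k : Int)) = PySem.List.pyGet? s2 (-1 - (k : Int)) := by
        constructor
        · omega
        · rw [hg1, hg2, List.getElem?_eq_getElem hk1', List.getElem?_eq_getElem hk2', hheads]
      rw [dif_pos hcond]
      have hrec : (-1 - (k : Int)) - 1 = -1 - ((k + 1 : Nat) : Int) := by push_cast; ring
      rw [hrec, aLoop2_eq s1 s2 limit hlim (k + 1)]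
      simp only [cpl, hheads]
      push_cast
      omega
    case neg =>
      have hcond : ¬ (-(-1 - (k : Int)) ≤ limit ∧
          PySem.List.pyGet? s1 (-1 - (k : Int)) = PySem.List.pyGet? s2 (-1 - (k : Int))) := by
        intro hc
        apply hheads
        have := hc.2
        rw [hg1, hg2, List.getElem?_eq_getElem hk1', List.getElem?_eq_getElem hk2'] at this
        exact Option.some.inj this
      rw [dif_neg hcond]
      simp only [cpl, if_neg hheads]
      simp
termination_by k => (limit - (k : Int)).toNat
decreasing_by omega

-- the sentinel-accumulator state after the first j iterations of B's loop
def bState (c r m j : Nat) : Nat × Nat :=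
  (if c < j then c else m, if r < j then r else m)

theorem bFold_eq (s1 s2 : List Char) (j : Nat)
    (hj : j ≤ min s1.length s2.length) :
    (PySem.List.pyRange (j : Int) ((min s1.length s2.length : Nat) : Int) 1).foldl
        (bStep s1 s2 s1.length s2.length (min s1.length s2.length))
        (bState (cpl s1 s2) (cpl s1.reverse s2.reverse) (min s1.length s2.length) j)
      = (cpl s1 s2, cpl s1.reverse s2.reverse) := by
  set m := min s1.length s2.length with hm
  set c := cpl s1 s2 with hc
  set r := cpl s1.reverse s2.reverse with hr
  have hc1 := cpl_le_left s1 s2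
  have hc2 := cpl_le_right s1 s2
  have hr1 := cpl_le_left s1.reverse s2.reverse
  have hr2 := cpl_le_right s1.reverse s2.reverse
  simp only [List.length_reverse] at hr1 hr2
  by_cases hjm : j = m
  case pos =>
    subst hjm
    rw [PySem.List.pyRange_one_eq_nil (by omega)]
    simp only [List.foldl_nil, bState]
    rw [Prod.mk.injEq]
    constructor <;> split <;> omega
  case neg =>
    have hjlt : j < m := by omega
    rw [PySem.List.pyRange_one_cons (by exact_mod_cast hjlt), List.foldl_cons]
    have hstep : bStep s1 s2 s1.length s2.length m (bState c r m j) (j : Int)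
        = bState c r m (j + 1) := by
      have hj1 : j < s1.length := by omega
      have hj2 : j < s2.length := by omega
      -- the prefix probe at index j
      have hp1 : PySem.List.pyGet? s1 ((j : Nat) : Int) = s1[j]? := PySem.List.pyGet?_natCast s1 j
      have hp2 : PySem.List.pyGet? s2 ((j : Nat) : Int) = s2[j]? := PySem.List.pyGet?_natCast s2 j
      -- the suffix probe at index n-1-j equals the reverse's element at j
      have hs1 : PySem.List.pyGet? s1 ((s1.length : Int) - 1 - (j : Int)) = s1.reverse[j]? := by
        have he : ((s1.length : Int) - 1 - (j : Int)) = ((s1.length - 1 - j : Nat) : Int) := by omega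
        rw [he, PySem.List.pyGet?_natCast, List.getElem?_reverse hj1]
      have hs2 : PySem.List.pyGet? s2 ((s2.length : Int) - 1 - (j : Int)) = s2.reverse[j]? := by
        have he : ((s2.length : Int) - 1 - (j : Int)) = ((s2.length - 1 - j : Nat) : Int) := by omega
        rw [he, PySem.List.pyGet?_natCast, List.getElem?_reverse hj2]
      simp only [bStep, bState, hp1, hp2, hs1, hs2, Int.toNat_natCast]
      have hfst : (if (if c < j then c else m) = m ∧ s1[j]? ≠ s2[j]? then j
          else if c < j then c else m) = if c < j + 1 then c else m := by
        by_cases h1 : c < j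
        · rw [if_neg (by rw [if_pos h1]; intro hq; omega), if_pos h1, if_pos (by omega)]
        · by_cases h2 : c = j
          · rw [if_pos ⟨by rw [if_neg (by omega)],
              by rw [← h2]; exact cpl_get_ne s1 s2 (by omega) (by omega)⟩,
              if_pos (by omega), h2]
          · have hjc : j < c := by omega
            rw [if_neg (by intro hq; exact hq.2 (cpl_get_eq s1 s2 j hjc)),
              if_neg h1, if_neg (by omega)]
      have hsnd : (if (if r < j then r else m) = m ∧ s1.reverse[j]? ≠ s2.reverse[j]? then j
          else if r < j then r else m) = if r < j + 1 then r else m := by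
        by_cases h1 : r < j
        · rw [if_neg (by rw [if_pos h1]; intro hq; omega), if_pos h1, if_pos (by omega)]
        · by_cases h2 : r = j
          · have hne : s1.reverse[j]? ≠ s2.reverse[j]? := by
              rw [← h2, hr]
              exact cpl_get_ne s1.reverse s2.reverse
                (by simp only [List.length_reverse]; omega)
                (by simp only [List.length_reverse]; omega)
            rw [if_pos ⟨by rw [if_neg (by omega)], hne⟩, if_pos (by omega), h2]
          · have hjr : j < r := by omega
            rw [if_neg (by intro hq; exact hq.2 (cpl_get_eq s1.reverse s2.reverse j hjr)),
              if_neg h1, if_neg (by omega)]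
      rw [hfst, hsnd]
    rw [hstep]
    have : ((j : Int) + 1) = ((j + 1 : Nat) : Int) := by push_cast; ring
    rw [this]
    exact bFold_eq s1 s2 (j + 1) (by omega)
termination_by min s1.length s2.length - j
decreasing_by omega

-- ===== VERDICT (by name: the statement is the Claim_ definition above) =====
theorem get_change_extent_py_spec : Claim_equal_get_change_extent_py := by
  intro str1 str2 _
  unfold Spec_get_change_extent_py get_change_extent_py get_change_extent_py_alt
  simp only
  set s1 := str1.toList
  set s2 := str2.toList
  have hmin : (if s1.length < s2.length then s1.length else s2.length) = min s1.length s2.length := by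
    split <;> omega
  set m := min s1.length s2.length with hm
  have hc1 := cpl_le_left s1 s2
  have hc2 := cpl_le_right s1 s2
  have hr1 := cpl_le_left s1.reverse s2.reverse
  have hr2 := cpl_le_right s1.reverse s2.reverse
  simp only [List.length_reverse] at hr1 hr2
  -- A's first loop
  have hstart : aLoop1 s1 s2 m 0 = cpl s1 s2 := aLoop1_eq_aux s1 s2 0 (by omega) (by omega)
  set c := cpl s1 s2 with hcdef
  -- A's second loop (k = 0: full reverses)
  have hend := aLoop2_eq s1 s2 ((m : Int) - (c : Int)) (by omega) 0
  simp only [Nat.cast_zero, List.drop_zero, sub_zero] at hend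
  norm_num at hend
  -- B's fused loop (j = 0: initial sentinel state (m, m))
  have hfold := bFold_eq s1 s2 0 (by omega)
  have hst0 : bState c (cpl s1.reverse s2.reverse) m 0 = (m, m) := by
    simp [bState]
  rw [hst0] at hfold
  simp only [Nat.cast_zero] at hfold
  rw [← hm] at hfold
  rw [hmin, hfold, hstart, hend]
  set r := cpl s1.reverse s2.reverse
  rw [Prod.mk.injEq]
  refine ⟨rfl, ?_⟩
  have hcm : c ≤ m := by omega
  push_cast
  omega
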